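-- pv_equiv track=rewrite | github.com/vladiibine/ml-examples | digits_to_binary.py | to_base2
-- ===== SOURCE A (Python) =====
-- def to_base2(num, num_elems):
--     result = []
--     while num != 0:
--         result.append(num % 2)
--         num = num // 2
--     result.reverse()
--     if len(result) < num_elems:
--         result = [0] * (num_elems - len(result)) + result
--     return result
-- ===== SOURCE B (Python) =====
-- def to_base2(num, num_elems):
--     length = max(num.bit_length(), num_elems)
--     return [(num >> i) & 1 for i in range(length - 1, -1, -1)]
-- ===== Notes on version B (the rewrite author's own statement) =====
-- stated objective: idiomatic
-- what changed: Replaces the LSB-first divide-append loop + reverse + conditional front padding by computing the output width up front (max(bit_length, num_elems)) and extracting bits MSB-first with a single shift-and-mask comprehension.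
import Mathlib
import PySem

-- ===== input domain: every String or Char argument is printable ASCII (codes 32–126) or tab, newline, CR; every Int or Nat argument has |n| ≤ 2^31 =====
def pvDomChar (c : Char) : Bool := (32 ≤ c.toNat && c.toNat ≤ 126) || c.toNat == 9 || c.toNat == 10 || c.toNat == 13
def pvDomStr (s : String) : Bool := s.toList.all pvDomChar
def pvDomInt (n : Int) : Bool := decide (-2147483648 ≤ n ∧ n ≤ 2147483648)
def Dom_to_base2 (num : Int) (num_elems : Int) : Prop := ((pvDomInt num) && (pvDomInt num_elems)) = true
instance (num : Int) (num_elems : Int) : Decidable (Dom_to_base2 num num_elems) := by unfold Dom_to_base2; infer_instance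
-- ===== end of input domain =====

-- B computes the output width up front (max of bit length and num_elems) and extracts bits
-- MSB-first in one indexed pass, instead of A's LSB-first divide loop + reverse + front padding.


-- ===== PORT A =====
-- The loop 'while num != 0: result.append(num % 2); num //= 2'. For num < 0 Python's loop
-- never terminates (num // 2 never reaches 0), so those inputs are outside Pre_; on Pre_
-- (0 ≤ num) the recursion guard 0 < num is exactly Python's num != 0.
def to_base2_go (num : Int) (result : List Int) : List Int :=
  if 0 < num then
    to_base2_go (PySem.Int.floordiv num 2) (result ++ [PySem.Int.mod num 2])
  else result
termination_by num.toNat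
decreasing_by
  rw [PySem.Int.floordiv_eq_ediv_of_pos (by omega : (0:Int) < 2)]
  omega

def to_base2 (num : Int) (num_elems : Int) : List Int :=
  let result := to_base2_go num []
  let result := result.reverse
  if (PySem.List.len result) < num_elems then
    List.replicate (num_elems - PySem.List.len result).toNat 0 ++ result
  else result

-- ===== PORT B =====
-- '(num >> i) & 1' is ported as 'PySem.Int.band (num >>> (i.toNat : Int)) 1'; exact here
-- because every i the countdown range produces is ≥ 0.
def to_base2_alt (num : Int) (num_elems : Int) : List Int :=
  let length : Int := max (PySem.Int.bitLength num : Int) num_elems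
  (PySem.List.pyRange (length - 1) (-1) (-1)).map
    (fun i => PySem.Int.band (num >>> (i.toNat : Int)) 1)

-- ===== PRECONDITION & SPEC =====
-- Pre_ excludes num < 0, on which A's while loop never terminates (num // 2 stays negative).
def Pre_to_base2 (num : Int) (num_elems : Int) : Prop := 0 ≤ num
instance (num : Int) (num_elems : Int) : Decidable (Pre_to_base2 num num_elems) := by
  unfold Pre_to_base2; infer_instance

def pvWitness_to_base2 : Int × Int := (6, 5)

def Spec_to_base2 (num : Int) (num_elems : Int) (out : List Int) : Prop := out = to_base2_alt num num_elems
instance (num : Int) (num_elems : Int) (out : List Int) : Decidable (Spec_to_base2 num num_elems out) := by unfold Spec_to_base2; infer_instance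

-- ===== CLAIM (what is proved, stated in full; the proofs are below) =====
def Claim_equal_to_base2 : Prop := ∀ (num : Int) (num_elems : Int), Dom_to_base2 num num_elems → Pre_to_base2 num num_elems → Spec_to_base2 num num_elems (to_base2 num num_elems)

-- ===== LEMMAS AND PROOFS =====

theorem fd_toNat_lt (num : Int) (h : 0 < num) :
    (PySem.Int.floordiv num 2).toNat < num.toNat := by
  rw [PySem.Int.floordiv_eq_ediv_of_pos (by omega : (0:Int) < 2)]
  omega

-- the accumulator only collects output
theorem to_base2_go_acc_aux : ∀ (n : Nat) (num : Int), num.toNat = n →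
    ∀ acc, to_base2_go num acc = acc ++ to_base2_go num [] := by
  intro n
  induction n using Nat.strong_induction_on with
  | _ n ih =>
  intro num hn acc
  rw [to_base2_go]
  conv_rhs => rw [to_base2_go]
  split_ifs with h
  · rw [ih _ (hn ▸ fd_toNat_lt num h) _ rfl (acc ++ [PySem.Int.mod num 2]),
        ih _ (hn ▸ fd_toNat_lt num h) _ rfl ([] ++ [PySem.Int.mod num 2])]
    simp
  · simp

theorem to_base2_go_acc (num : Int) (acc : List Int) :
    to_base2_go num acc = acc ++ to_base2_go num [] :=
  to_base2_go_acc_aux num.toNat num rfl acc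

theorem nat_shift_succ_div (m i : Nat) : m >>> (i + 1) = (m / 2) >>> i := by
  rw [Nat.add_comm, Nat.shiftRight_add, Nat.shiftRight_one]

-- A's loop output, LSB first, is the bits of num indexed 0 .. bitLength num - 1
theorem to_base2_go_eq_aux : ∀ (n m : Nat), m = n →
    to_base2_go (m : Int) [] =
      (List.range (PySem.Int.bitLength (m : Int))).map
        (fun i : Nat => PySem.Int.band ((m : Int) >>> ((i : Nat) : Int)) 1) := by
  intro n
  induction n using Nat.strong_induction_on with
  | _ n ih =>
  intro m hm
  rw [to_base2_go]
  by_cases h : 0 < (m : Int)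
  · rw [if_pos h]
    have hm' : 0 < m := by exact_mod_cast h
    have hfd : PySem.Int.floordiv (m : Int) 2 = ((m / 2 : Nat) : Int) := by
      exact_mod_cast PySem.Int.floordiv_natCast m 2
    subst hm
    rw [hfd, to_base2_go_acc, ih (m / 2) (by omega : m / 2 < m) _ rfl,
        PySem.Int.bitLength_natCast hm', List.range_succ_eq_map]
    simp only [List.map_cons, List.map_map, List.nil_append, List.singleton_append]
    congr 1
    · rw [Int.shiftRight_natCast m 0, Nat.shiftRight_zero, PySem.Int.band_one]
    · apply List.map_congr_left
      intro i _
      simp only [Function.comp_apply, Nat.succ_eq_add_one]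
      rw [Int.shiftRight_natCast m (i+1), nat_shift_succ_div,
          ← Int.shiftRight_natCast (m/2) i]
  · rw [if_neg h]
    have : m = 0 := by omega
    subst this
    simp

theorem to_base2_go_eq (num : Int) (h : 0 ≤ num) :
    to_base2_go num [] =
      (List.range (PySem.Int.bitLength num)).map
        (fun i : Nat => PySem.Int.band (num >>> ((i : Nat) : Int)) 1) := by
  obtain ⟨m, rfl⟩ := Int.eq_ofNat_of_zero_le h
  exact to_base2_go_eq_aux m m rfl

-- high bits vanish: for 0 ≤ num and bitLength num ≤ i, (num >> i) & 1 = 0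
theorem band_shift_high (num : Int) (h : 0 ≤ num) (i : Nat)
    (hi : PySem.Int.bitLength num ≤ i) :
    PySem.Int.band (num >>> ((i : Nat) : Int)) 1 = 0 := by
  obtain ⟨m, rfl⟩ := Int.eq_ofNat_of_zero_le h
  have hb : m < 2 ^ i := by
    calc m = (m : Int).natAbs := by simp
    _ < 2 ^ PySem.Int.bitLength (m : Int) := PySem.Int.lt_two_pow_bitLength _
    _ ≤ 2 ^ i := Nat.pow_le_pow_right (by omega) hi
  rw [Int.shiftRight_natCast m i, Nat.shiftRight_eq_div_pow, Nat.div_eq_of_lt hb]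
  simp [PySem.Int.band_one]

theorem pyRange_countdown (L : Int) :
    PySem.List.pyRange (L - 1) (-1) (-1) = (PySem.List.pyRange 0 L 1).reverse := by
  rw [PySem.List.pyRange_neg_one_eq_reverse]
  norm_num

theorem map_range_zero (d : Nat) (g : Nat → Int) (h : ∀ j < d, g j = 0) :
    (List.range d).map g = List.replicate d 0 := by
  rw [List.eq_replicate_iff]
  constructor
  · simp
  · intro b hb
    simp only [List.mem_map, List.mem_range] at hb
    obtain ⟨j, hj, rfl⟩ := hb
    exact h j hj

-- B is the reversed LSB-first bit map, taken up to width max(bitLength, num_elems)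
theorem alt_eq (num : Int) (num_elems : Int) :
    to_base2_alt num num_elems =
      ((List.range (max (PySem.Int.bitLength num : Int) num_elems).toNat).map
        (fun i : Nat => PySem.Int.band (num >>> ((i : Nat) : Int)) 1)).reverse := by
  simp only [to_base2_alt]
  rw [pyRange_countdown, List.map_reverse, PySem.List.pyRange_one]
  simp [List.map_map, Function.comp_def]

theorem to_base2_main (num : Int) (num_elems : Int) (hpre : 0 ≤ num) :
    to_base2 num num_elems = to_base2_alt num num_elems := by
  unfold to_base2
  rw [to_base2_go_eq num hpre, alt_eq]
  simp only [PySem.List.len_eq, List.length_reverse, List.length_map, List.length_range]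
  by_cases h2 : ((PySem.Int.bitLength num : Int)) < num_elems
  · rw [if_pos h2, max_eq_right (le_of_lt h2)]
    have hN : num_elems.toNat = PySem.Int.bitLength num +
        (num_elems.toNat - PySem.Int.bitLength num) := by omega
    rw [hN, List.range_add, List.map_append, List.reverse_append, List.map_map]
    have hz : (List.range (num_elems.toNat - PySem.Int.bitLength num)).map
        ((fun i : Nat => PySem.Int.band (num >>> ((i : Nat) : Int)) 1) ∘
          (PySem.Int.bitLength num + ·)) =
        List.replicate (num_elems.toNat - PySem.Int.bitLength num) 0 := by
      apply map_range_zero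
      intro j _
      exact band_shift_high num hpre _ (Nat.le_add_right _ _)
    have hc : (num_elems - (PySem.Int.bitLength num : Int)).toNat =
        num_elems.toNat - PySem.Int.bitLength num := by omega
    rw [hz, List.reverse_replicate, hc]
  · rw [if_neg h2, max_eq_left (by omega)]
    simp

-- ===== VERDICT (by name: the statement is the Claim_ definition above) =====
theorem to_base2_spec : Claim_equal_to_base2 := by
  intro num num_elems _ hpre
  unfold Spec_to_base2
  exact to_base2_main num num_elems hpre
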